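-- pv_equiv track=rewrite | github.com/praveenreddydo/daily-coding | day22.py | reconstruction
-- ===== SOURCE A (Python) =====
-- def reconstruction(words, s):
--     words = set(words)
--     res = []
--
--     n = len(s)
--     i = j = 0
--
--     while j < n:
--         if s[i:j+1] in words:
--             res.append(s[i:j+1])
--             i = j + 1
--         else:
--             if j == n - 1:
--                 return None
--
--         j += 1
--
--     return res
-- ===== SOURCE B (Python) =====
-- def reconstruction(words, s):
--     # Build a trie over the words; from each segment start walk characters
--     # down the trie to the shortest dictionary match (end marker key: None).
--     root = {}
--     for w in words:
--         node = root
--         for c in w: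
--             node = node.setdefault(c, {})
--         node[None] = True
--     res = []
--     i = 0
--     n = len(s)
--     while i < n:
--         node = root
--         j = i
--         L = None
--         while j < n and s[j] in node:
--             node = node[s[j]]
--             j += 1
--             if None in node:
--                 L = j - i
--                 break
--         if L is None:
--             return None
--         res.append(s[i:i+L])
--         i += L
--     return res
-- ===== Notes on version B (the rewrite author's own statement) =====
-- stated objective: alternative
-- what changed: B builds a character trie from the word list once and, at each segment start, walks characters down the trie, stopping at the first end-marked node (shortest match) or when the path dies, instead of A's repeated substring-in-set membership tests while j scans to the end of s.
import Mathlib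
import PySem

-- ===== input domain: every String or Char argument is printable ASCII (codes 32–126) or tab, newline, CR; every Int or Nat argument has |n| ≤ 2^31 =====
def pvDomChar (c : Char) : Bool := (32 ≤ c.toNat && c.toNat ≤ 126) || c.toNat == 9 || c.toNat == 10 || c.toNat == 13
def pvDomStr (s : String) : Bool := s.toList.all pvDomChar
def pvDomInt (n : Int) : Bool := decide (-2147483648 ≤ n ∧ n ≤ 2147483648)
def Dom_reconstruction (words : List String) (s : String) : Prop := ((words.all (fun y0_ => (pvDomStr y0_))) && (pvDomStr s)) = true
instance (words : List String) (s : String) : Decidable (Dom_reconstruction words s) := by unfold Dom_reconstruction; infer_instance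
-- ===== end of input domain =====

-- B replaces A's scan of ever-longer substrings against a word set by a character trie
-- built once from the word list, walked from each segment start to the first end-marked
-- node (objective: alternative; same return value everywhere).

-- ===== PORT A =====
-- while j < n: if s[i:j+1] in words: append, i = j+1 else: if j == n-1: return None; j += 1
def reconAuxA (ws : PySem.Set String) (s : String) (n : Int) (res : List String) (i j : Int) :
    Option (List String) :=
  if _h : j < n then
    let piece := PySem.Str.slice s (some i) (some (j + 1))
    if PySem.Set.contains ws piece then
      reconAuxA ws s n (res ++ [piece]) (j + 1) (j + 1)
    else
      if j = n - 1 then none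
      else reconAuxA ws s n res i (j + 1)
  else some res
termination_by (n - j).toNat
decreasing_by all_goals omega

def reconstruction (words : List String) (s : String) : Option (List String) :=
  let ws := PySem.Set.ofList words
  let n := PySem.Str.len s
  reconAuxA ws s n [] 0 0

-- ===== PORT B =====
-- trie node: end flag + children (Python: dict with chars as keys, None-key end marker)
mutual
inductive PTrie where
  | mk : Bool → PKids → PTrie
deriving DecidableEq, Repr
inductive PKids where
  | nil : PKids
  | cons : Char → PTrie → PKids → PKids
deriving DecidableEq, Repr
end

def PTrie.isEnd : PTrie → Bool
  | .mk e _ => e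

def PTrie.kids : PTrie → PKids
  | .mk _ k => k

-- node[c] lookup / node.setdefault-then-replace (keys unique, insertion order kept)
def kidsGet : PKids → Char → Option PTrie
  | .nil, _ => none
  | .cons c' t rest, c => if c' = c then some t else kidsGet rest c

def kidsSet : PKids → Char → PTrie → PKids
  | .nil, c, t => .cons c t .nil
  | .cons c' t' rest, c, t => if c' = c then .cons c' t rest else .cons c' t' (kidsSet rest c t)

-- for c in w: node = node.setdefault(c, {});  node[None] = True
def insertT : PTrie → List Char → PTrie
  | .mk _ k, [] => .mk true k
  | .mk e k, c :: cs =>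
      let child := (kidsGet k c).getD (.mk false .nil)
      .mk e (kidsSet k c (insertT child cs))

-- inner loop: while j < n and s[j] in node: descend; if end marker: L = j - i
def walkT : List Char → PTrie → Int → Option Int
  | [], _, _ => none
  | c :: rest, t, acc =>
    match kidsGet t.kids c with
    | none => none
    | some t' => if t'.isEnd then some (acc + 1) else walkT rest t' (acc + 1)

-- needed by bLoop's termination: a found length is positive and bounded by the suffix
theorem walkT_some_bounds : ∀ (cs : List Char) (t : PTrie) (acc L : Int),
    walkT cs t acc = some L → acc < L ∧ L ≤ acc + cs.length
  | [], _, acc, L, h => absurd h (by simp [walkT])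
  | c :: rest, t, acc, L, h => by
    simp only [walkT] at h
    cases hk : kidsGet t.kids c with
    | none => rw [hk] at h; exact absurd h (by simp)
    | some t' =>
      rw [hk] at h
      have h2 : (if t'.isEnd = true then some (acc + 1) else walkT rest t' (acc + 1)) = some L := h
      by_cases he : t'.isEnd = true
      · rw [if_pos he] at h2
        simp only [Option.some.injEq] at h2
        simp only [List.length_cons]
        omega
      · rw [if_neg he] at h2
        have := walkT_some_bounds rest t' (acc + 1) L h2
        simp only [List.length_cons]
        omega

-- outer loop: while i < n: walk trie from s[i]; if no match: None; append s[i:i+L]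
def bLoop (root : PTrie) (s : String) (n : Int) (res : List String) (i : Int) :
    Option (List String) :=
  if _h : i < n then
    match hw : walkT (s.toList.drop i.toNat) root 0 with
    | none => none
    | some L => bLoop root s n (res ++ [PySem.Str.slice s (some i) (some (i + L))]) (i + L)
  else some res
termination_by (n - i).toNat
decreasing_by
  have := walkT_some_bounds _ _ _ _ hw
  omega

def reconstruction_alt (words : List String) (s : String) : Option (List String) :=
  let root := words.foldl (fun t w => insertT t w.toList) (.mk false .nil)
  bLoop root s (PySem.Str.len s) [] 0

-- ===== PRECONDITION & SPEC =====
def Spec_reconstruction (words : List String) (s : String) (out : Option (List String)) : Prop := out = reconstruction_alt words s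
instance (words : List String) (s : String) (out : Option (List String)) : Decidable (Spec_reconstruction words s out) := by unfold Spec_reconstruction; infer_instance

-- ===== CLAIM (what is proved, stated in full; the proofs are below) =====
def Claim_equal_reconstruction : Prop := ∀ (words : List String) (s : String), Dom_reconstruction words s → Spec_reconstruction words s (reconstruction words s)

-- ===== LEMMAS AND PROOFS =====

-- proof-side helper: first k in ks with s[i:i+k] in ws (characterizes A's inner scan)
def bFind (ws : PySem.Set String) (s : String) (i : Int) (ks : List Int) : Option Int :=
  match ks with
  | [] => none
  | k :: rest =>
    if PySem.Set.contains ws (PySem.Str.slice s (some i) (some (i + k))) then some k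
    else bFind ws s i rest

theorem bFind_none (ws : PySem.Set String) (s : String) (i : Int) (ks : List Int)
    (h : ∀ k ∈ ks, PySem.Set.contains ws (PySem.Str.slice s (some i) (some (i + k))) = false) :
    bFind ws s i ks = none := by
  induction ks with
  | nil => rfl
  | cons a rest ih =>
    simp only [bFind]
    rw [h a (List.mem_cons_self)]
    simp only [Bool.false_eq_true, if_false]
    exact ih (fun k hk => h k (List.mem_cons_of_mem _ hk))

-- A's inner scan from j with segment start i equals the first matching length in [j-i+1, n-i]
theorem scanA (ws : PySem.Set String) (s : String) (res : List String) :
    ∀ (fuel : Nat) (i j : Int), 0 ≤ i → i ≤ j → j < PySem.Str.len s →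
      (PySem.Str.len s - j).toNat ≤ fuel →
    reconAuxA ws s (PySem.Str.len s) res i j =
      match bFind ws s i (PySem.List.pyRange (j - i + 1) (PySem.Str.len s - i + 1) 1) with
      | some L =>
          reconAuxA ws s (PySem.Str.len s)
            (res ++ [PySem.Str.slice s (some i) (some (i + L))]) (i + L) (i + L)
      | none => none := by
  intro fuel
  induction fuel with
  | zero => intro i j _ _ hj hf; omega
  | succ m ih =>
    intro i j h0 hij hj hf
    set n := PySem.Str.len s with hn
    rw [reconAuxA, dif_pos hj]
    rw [PySem.List.pyRange_one_cons (by omega : j - i + 1 < n - i + 1)]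
    have hidx : i + (j - i + 1) = j + 1 := by ring
    simp only [bFind, hidx]
    by_cases hc : PySem.Set.contains ws (PySem.Str.slice s (some i) (some (j + 1))) = true
    · rw [if_pos hc, if_pos hc]
      show reconAuxA ws s n (res ++ [PySem.Str.slice s (some i) (some (j + 1))]) (j + 1) (j + 1)
         = reconAuxA ws s n (res ++ [PySem.Str.slice s (some i) (some (i + (j - i + 1)))])
             (i + (j - i + 1)) (i + (j - i + 1))
      rw [hidx]
    · rw [if_neg hc, if_neg hc]
      by_cases hlast : j = n - 1
      · rw [if_pos hlast]
        rw [PySem.List.pyRange_one_eq_nil (by omega : n - i + 1 ≤ j - i + 1 + 1)]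
        rfl
      · rw [if_neg hlast]
        rw [ih i (j + 1) h0 (by omega) (by omega) (by omega)]
        have e2 : j + 1 - i + 1 = j - i + 1 + 1 := by ring
        rw [e2]

-- trie path lookup (proof-side)
def lookT : PTrie → List Char → Option PTrie
  | t, [] => some t
  | t, c :: cs =>
    match kidsGet t.kids c with
    | none => none
    | some t' => lookT t' cs

def memT (t : PTrie) (p : List Char) : Bool :=
  match lookT t p with
  | some t' => t'.isEnd
  | none => false

theorem kidsGet_kidsSet : ∀ (k : PKids) (c c' : Char) (t : PTrie),
    kidsGet (kidsSet k c t) c' = if c = c' then some t else kidsGet k c'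
  | .nil, c, c', t => by simp [kidsSet, kidsGet]
  | .cons a ta rest, c, c', t => by
    by_cases hac : a = c
    · subst hac
      simp only [kidsSet, kidsGet]
      by_cases h : a = c'
      · simp [kidsGet, h]
      · simp [kidsGet, h]
    · simp only [kidsSet, if_neg hac]
      by_cases h : a = c'
      · have hcc : ¬ c = c' := fun hh => hac (hh ▸ h)
        simp [kidsGet, h, hcc]
      · simp [kidsGet, h, kidsGet_kidsSet rest c c' t]

theorem memT_nilp (t : PTrie) : memT t [] = t.isEnd := rfl

theorem memT_cons (t : PTrie) (c : Char) (ps : List Char) :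
    memT t (c :: ps) = match kidsGet t.kids c with
      | none => false
      | some t' => memT t' ps := by
  simp only [memT, lookT]
  cases kidsGet t.kids c <;> rfl

theorem memT_empty (p : List Char) : memT (.mk false .nil) p = false := by
  cases p with
  | nil => rfl
  | cons c ps => rw [memT_cons]; rfl

theorem memT_insertT : ∀ (w : List Char) (t : PTrie) (p : List Char),
    memT (insertT t w) p = (if p = w then true else memT t p)
  | [], .mk e k, p => by
    cases p with
    | nil => simp [insertT, memT_nilp, PTrie.isEnd]
    | cons c ps =>
      rw [insertT, memT_cons, memT_cons]
      simp [PTrie.kids]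
  | c :: cs, .mk e k, p => by
    cases p with
    | nil =>
      rw [insertT]
      simp [memT_nilp, PTrie.isEnd]
    | cons c' ps =>
      rw [insertT, memT_cons, memT_cons]
      simp only [PTrie.kids, kidsGet_kidsSet]
      by_cases hcc : c = c'
      · subst hcc
        rw [if_pos rfl]
        have hrec := memT_insertT cs ((kidsGet k c).getD (.mk false .nil)) ps
        simp only [hrec]
        cases hk : kidsGet k c with
        | none =>
          simp only [Option.getD]
          by_cases hps : ps = cs
          · simp [hps]
          · simp [hps, memT_empty]
        | some ch =>
          simp only [Option.getD]
          by_cases hps : ps = cs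
          · simp [hps]
          · simp [hps]
      · rw [if_neg hcc]
        have hne : ¬ (c' :: ps) = (c :: cs) := by
          intro hh
          exact hcc ((List.cons.injEq _ _ _ _).mp hh).1.symm
        rw [if_neg hne]

theorem memT_foldl : ∀ (ws : List String) (t : PTrie) (p : List Char),
    memT (ws.foldl (fun t w => insertT t w.toList) t) p
      = (decide (∃ w ∈ ws, w.toList = p) || memT t p)
  | [], t, p => by simp
  | w :: ws, t, p => by
    simp only [List.foldl_cons]
    rw [memT_foldl ws (insertT t w.toList) p, memT_insertT]
    by_cases hp : p = w.toList
    · subst hp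
      simp
    · simp only [if_neg hp]
      congr 1
      simp only [decide_eq_decide, List.mem_cons]
      constructor
      · rintro ⟨v, hv, he⟩
        exact ⟨v, Or.inr hv, he⟩
      · rintro ⟨v, hv | hv, he⟩
        · exact absurd (hv ▸ he) (fun hh => hp hh.symm)
        · exact ⟨v, hv, he⟩

theorem memT_fold (words : List String) (p : List Char) :
    memT (words.foldl (fun t w => insertT t w.toList) (.mk false .nil)) p
      = decide (∃ w ∈ words, w.toList = p) := by
  rw [memT_foldl, memT_empty]
  simp

theorem lookT_append : ∀ (p : List Char) (t : PTrie) (q : List Char),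
    lookT t (p ++ q) = match lookT t p with
      | none => none
      | some t' => lookT t' q
  | [], t, q => by simp [lookT]
  | c :: ps, t, q => by
    simp only [List.cons_append, lookT]
    cases kidsGet t.kids c with
    | none => rfl
    | some t' => exact lookT_append ps t' q

theorem memT_of_lookT_none (t : PTrie) (p q : List Char) (h : lookT t p = none) :
    memT t (p ++ q) = false := by
  simp only [memT, lookT_append, h]

-- slice s[i:i+k] is in the word set iff its char list is an end-marked trie path
theorem slice_mem_memT (words : List String) (s : String) (i k : Int)
    (h0 : 0 ≤ i) (hk : 0 ≤ k) :
    PySem.Set.contains (PySem.Set.ofList words) (PySem.Str.slice s (some i) (some (i + k)))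
      = memT (words.foldl (fun t w => insertT t w.toList) (.mk false .nil))
          ((s.toList.drop i.toNat).take k.toNat) := by
  have htl : (PySem.Str.slice s (some i) (some (i + k))).toList
      = (s.toList.drop i.toNat).take k.toNat := by
    rw [PySem.Str.toList_slice, PySem.Chars.slice_eq_listSlice,
        PySem.List.slice_toNat _ h0 (by omega)]
    congr 1
    omega
  rw [memT_fold, ← htl]
  by_cases hmem : PySem.Str.slice s (some i) (some (i + k)) ∈ words
  · rw [decide_eq_true ⟨_, hmem, rfl⟩]
    have : PySem.Set.contains (PySem.Set.ofList words)
        (PySem.Str.slice s (some i) (some (i + k))) = true := by simp [pysem, hmem]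
    rw [this]
  · have h2 : ¬ ∃ w ∈ words, w.toList = (PySem.Str.slice s (some i) (some (i + k))).toList := by
      rintro ⟨w, hw, he⟩
      exact hmem (String.toList_inj.mp he ▸ hw)
    rw [decide_eq_false h2]
    have : ¬ PySem.Set.contains (PySem.Set.ofList words)
        (PySem.Str.slice s (some i) (some (i + k))) = true := by simp [pysem, hmem]
    simp only [Bool.not_eq_true] at this
    rw [this]

-- the trie walk from consumed depth d equals the first matching length in [d+1, n-i]
theorem walk_gen (words : List String) (s : String) (i : Int)
    (h0 : 0 ≤ i) (hi : i < PySem.Str.len s) :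
    ∀ (rest : List Char) (d : Nat) (t : PTrie),
      rest = (s.toList.drop i.toNat).drop d → d ≤ (s.toList.drop i.toNat).length →
      lookT (words.foldl (fun t w => insertT t w.toList) (.mk false .nil))
        ((s.toList.drop i.toNat).take d) = some t →
      walkT rest t (d : Int)
        = bFind (PySem.Set.ofList words) s i
            (PySem.List.pyRange ((d : Int) + 1) (PySem.Str.len s - i + 1) 1) := by
  set n := PySem.Str.len s with hn
  set u := s.toList.drop i.toNat with hu
  set root := words.foldl (fun t w => insertT t w.toList) (PTrie.mk false PKids.nil) with hroot
  have hn' : n = (s.toList.length : Int) := by simp [hn, PySem.Str.len_eq]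
  have hulen : (u.length : Int) = n - i := by
    have h1 : u.length = s.toList.length - i.toNat := by simp [hu]
    omega
  intro rest
  induction rest with
  | nil =>
    intro d t hrest hd _
    have hdlen : d = u.length := by
      have := congrArg List.length hrest
      simp at this
      omega
    rw [walkT, PySem.List.pyRange_one_eq_nil (by omega : n - i + 1 ≤ (d : Int) + 1)]
    rfl
  | cons c rr ih =>
    intro d t hrest hd hlook
    have hdlt : d < u.length := by
      have := congrArg List.length hrest
      simp at this
      omega
    have htake : u.take (d + 1) = u.take d ++ [c] := by
      rw [List.take_add, ← hrest]
      rfl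
    have hdrop : u.drop (d + 1) = rr := by
      have h1 := congrArg (List.drop 1) hrest
      simpa [List.drop_drop, Nat.add_comm] using h1.symm
    have hlook1 : lookT root (u.take (d + 1))
        = match kidsGet t.kids c with
          | none => none
          | some t' => some t' := by
      rw [htake, lookT_append _ _ _, hlook]
      simp only [lookT]
    have hhead : ((d : Int) + 1).toNat = d + 1 := by omega
    have hmemhead : PySem.Set.contains (PySem.Set.ofList words)
        (PySem.Str.slice s (some i) (some (i + ((d : Int) + 1))))
        = memT root (u.take (d + 1)) := by
      rw [slice_mem_memT words s i ((d : Int) + 1) h0 (by omega), hhead]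
    rw [PySem.List.pyRange_one_cons (by omega : (d : Int) + 1 < n - i + 1)]
    rw [walkT]
    cases hk : kidsGet t.kids c with
    | none =>
      have hlooknone : lookT root (u.take (d + 1)) = none := by rw [hlook1, hk]
      refine (bFind_none _ _ _ _ ?_).symm
      intro k hkmem
      rcases List.mem_cons.mp hkmem with rfl | hkmem'
      · rw [hmemhead]
        simp only [memT, hlooknone]
      · have hkr := PySem.List.mem_pyRange_one.mp hkmem'
        have hdec : u.take k.toNat = u.take (d + 1) ++ ((u.drop (d + 1)).take (k.toNat - (d + 1))) := by
          rw [← List.take_add]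
          congr 1
          omega
        rw [slice_mem_memT words s i k h0 (by omega), hdec]
        exact memT_of_lookT_none _ _ _ hlooknone
    | some t' =>
      have hlookt' : lookT root (u.take (d + 1)) = some t' := by rw [hlook1, hk]
      have hmem : memT root (u.take (d + 1)) = t'.isEnd := by
        simp only [memT, hlookt']
      rw [bFind, hmemhead, hmem]
      cases he : t'.isEnd with
      | true => simp [he]
      | false =>
        simp only [he, Bool.false_eq_true, if_false]
        have h2 := ih (d + 1) t' hdrop.symm (by omega) hlookt'
        push_cast at h2
        exact h2

theorem walk_eq_bFind (words : List String) (s : String) (i : Int)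
    (h0 : 0 ≤ i) (hi : i < PySem.Str.len s) :
    walkT (s.toList.drop i.toNat)
        (words.foldl (fun t w => insertT t w.toList) (.mk false .nil)) 0
      = bFind (PySem.Set.ofList words) s i
          (PySem.List.pyRange 1 (PySem.Str.len s - i + 1) 1) := by
  have := walk_gen words s i h0 hi (s.toList.drop i.toNat) 0
    (words.foldl (fun t w => insertT t w.toList) (.mk false .nil))
    (by simp) (by omega) (by simp [lookT])
  simpa using this

theorem mainLoop (words : List String) (s : String) :
    ∀ (fuel : Nat) (i : Int) (res : List String), 0 ≤ i →
      (PySem.Str.len s - i).toNat ≤ fuel →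
    reconAuxA (PySem.Set.ofList words) s (PySem.Str.len s) res i i
      = bLoop (words.foldl (fun t w => insertT t w.toList) (.mk false .nil)) s
          (PySem.Str.len s) res i := by
  intro fuel
  induction fuel with
  | zero =>
    intro i res h0 hf
    rw [reconAuxA, bLoop, dif_neg (by omega), dif_neg (by omega)]
  | succ m ih =>
    intro i res h0 hf
    set n := PySem.Str.len s with hn
    by_cases hi : i < n
    · rw [scanA _ s res m.succ i i h0 le_rfl hi hf]
      have hii : i - i + 1 = (1 : Int) := by ring
      rw [hii, ← walk_eq_bFind words s i h0 hi]
      rw [bLoop, dif_pos hi]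
      cases hw : walkT (s.toList.drop i.toNat)
          (words.foldl (fun t w => insertT t w.toList) (.mk false .nil)) 0 with
      | none => rfl
      | some L =>
        have := walkT_some_bounds _ _ _ _ hw
        have hlen : (s.toList.drop i.toNat).length = (n - i).toNat := by
          simp [hn, PySem.Str.len_eq]
          omega
        rw [hlen] at this
        exact ih (i + L) _ (by omega) (by omega)
    · rw [reconAuxA, bLoop, dif_neg hi, dif_neg hi]

-- ===== VERDICT (by name: the statement is the Claim_ definition above) =====
theorem reconstruction_spec : Claim_equal_reconstruction := by
  intro words s _hdom
  unfold Spec_reconstruction reconstruction reconstruction_alt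
  exact mainLoop words s (PySem.Str.len s).toNat 0 [] le_rfl (by omega)
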